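-- pv_equiv track=rewrite | github.com/jayho-k/TIL | PS/Back_jun/5212_global_warming.py | mxmn
-- ===== SOURCE A (Python) =====
-- def mxmn(grid):
--
--     mn = 0
--     for g in grid:
--         g_cnt = g.count('X')
--         if g_cnt == 0:
--             mn+=1
--         else:
--             break
--
--     mx = len(grid)
--     for g in grid[::-1]:
--         g_cnt = g.count('X')
--         if g_cnt == 0:
--             mx-=1
--         else:
--             break
--
--     return mn,mx
-- ===== SOURCE B (Python) =====
-- def mxmn(grid):
--     idx = [i for i, g in enumerate(grid) if 'X' in g]
--     if not idx:
--         return len(grid), 0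
--     return idx[0], idx[-1] + 1
-- ===== Notes on version B (the rewrite author's own statement) =====
-- stated objective: simpler
-- what changed: Replaces A's two separate early-breaking scans (forward, and over a reversed copy) by one forward pass that collects the indices of rows containing 'X' and reads that list's first and last elements.
import Mathlib
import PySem

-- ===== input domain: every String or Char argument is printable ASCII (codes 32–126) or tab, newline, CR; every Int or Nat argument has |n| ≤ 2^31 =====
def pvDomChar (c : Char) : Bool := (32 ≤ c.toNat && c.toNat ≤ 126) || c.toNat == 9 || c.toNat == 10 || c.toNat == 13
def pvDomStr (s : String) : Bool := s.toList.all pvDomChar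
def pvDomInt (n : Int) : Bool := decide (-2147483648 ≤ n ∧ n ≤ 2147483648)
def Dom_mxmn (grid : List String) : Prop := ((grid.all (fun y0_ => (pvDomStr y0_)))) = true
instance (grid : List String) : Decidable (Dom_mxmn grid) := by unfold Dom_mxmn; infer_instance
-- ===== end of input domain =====

-- B replaces A's two early-breaking scans (forward + over a reversed copy) by one forward
-- pass collecting the indices of rows containing 'X'; objective: simpler.

-- ===== PORT A =====
-- first loop: mn = 0; for g in grid: if g.count('X') == 0: mn += 1 else: break
def mxmnLoop1 (mn : Int) : List String → Int
  | [] => mn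
  | g :: rest =>
      let g_cnt := PySem.Str.count g "X"
      if g_cnt = 0 then mxmnLoop1 (mn + 1) rest else mn

-- second loop: mx = len(grid); for g in grid[::-1]: if g.count('X') == 0: mx -= 1 else: break
def mxmnLoop2 (mx : Int) : List String → Int
  | [] => mx
  | g :: rest =>
      let g_cnt := PySem.Str.count g "X"
      if g_cnt = 0 then mxmnLoop2 (mx - 1) rest else mx

def mxmn (grid : List String) : Int × Int :=
  let mn := mxmnLoop1 0 grid
  let mx := mxmnLoop2 (grid.length : Int) ((PySem.List.slice? grid none none (-1)).getD [])
  (mn, mx)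

-- ===== PORT B =====
def mxmn_alt (grid : List String) : Int × Int :=
  let idx := (PySem.List.enumerate grid 0).filterMap
      (fun p => if PySem.Str.isIn "X" p.2 then some p.1 else none)
  if idx.isEmpty then ((grid.length : Int), 0)
  else (idx.headD 0, idx.getLastD 0 + 1)

-- ===== PRECONDITION & SPEC =====
def Spec_mxmn (grid : List String) (out : Int × Int) : Prop := out = mxmn_alt grid
instance (grid : List String) (out : Int × Int) : Decidable (Spec_mxmn grid out) := by unfold Spec_mxmn; infer_instance

-- ===== CLAIM (what is proved, stated in full; the proofs are below) =====
def Claim_equal_mxmn : Prop := ∀ (grid : List String), Dom_mxmn grid → Spec_mxmn grid (mxmn grid)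

-- ===== LEMMAS AND PROOFS =====

-- 'X' occurs in g (the row test both programs make, in B's form)
def pvHasX (g : String) : Bool := PySem.Str.isIn "X" g

-- length of the leading run of rows without 'X'
def pvLead (grid : List String) : Nat := (grid.takeWhile (fun g => !pvHasX g)).length

-- the index list B materialises, with a general start offset
def pvIdx (s : Int) (grid : List String) : List Int :=
  (PySem.List.enumerate grid s).filterMap (fun p => if pvHasX p.2 then some p.1 else none)

theorem pv_count_go (fuel : Nat) : ∀ (l : List Char) (acc : Nat), l.length ≤ fuel →
    PySem.Chars.count.go ['X'] fuel l acc = acc + l.count 'X' := by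
  induction fuel with
  | zero => intro l acc h; cases l with
      | nil => simp [PySem.Chars.count.go]
      | cons a t => simp at h
  | succ n ih =>
      intro l acc h
      cases l with
      | nil => simp [PySem.Chars.count.go]
      | cons a t =>
        simp only [PySem.Chars.count.go]
        by_cases hx : a = 'X'
        · subst hx
          have hpre : List.isPrefixOf ['X'] ('X' :: t) = true := by
            simp [List.isPrefixOf]
          simp only [hpre]
          rw [show (List.drop (List.length ['X']) ('X' :: t)) = t by simp]
          rw [ih t (acc + 1) (by simpa using Nat.le_of_succ_le_succ (by simpa using h))]
          simp
          omega
        · have hpre : List.isPrefixOf ['X'] (a :: t) = false := by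
            simp [List.isPrefixOf]
            intro hc; exact absurd hc.symm hx
          simp only [hpre]
          rw [if_neg (by simp)]
          rw [ih t acc (by simpa using Nat.le_of_succ_le_succ (by simpa using h))]
          simp [hx]

-- bridge: A's row test g.count('X') == 0 is the negation of B's row test 'X' in g
theorem pv_count_eq_zero_iff (g : String) :
    (PySem.Str.count g "X" = 0) ↔ pvHasX g = false := by
  have h1 : PySem.Str.count g "X" = g.toList.count 'X' := by
    simp only [PySem.Str.count_eq]
    rw [show ("X".toList) = ['X'] from rfl]
    unfold PySem.Chars.count
    rw [if_neg (by simp)]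
    simpa using pv_count_go g.toList.length g.toList 0 (le_refl _)
  have h2 : pvHasX g = false ↔ ¬ (['X'] <:+: g.toList) := by
    unfold pvHasX
    constructor
    · intro hf hinf
      have := (PySem.Str.isIn_iff_infix "X" g).2 (by simpa using hinf)
      rw [hf] at this; cases this
    · intro hni
      cases hb : PySem.Str.isIn "X" g
      · rfl
      · exact absurd (by simpa using (PySem.Str.isIn_iff_infix "X" g).1 hb) hni
  have h3 : (['X'] <:+: g.toList) ↔ 'X' ∈ g.toList := by
    constructor
    · intro hinf; exact (List.singleton_sublist).1 hinf.sublist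
    · intro hm
      obtain ⟨s, t, hst⟩ := List.append_of_mem hm
      exact ⟨s, t, by simp [hst]⟩
  rw [h1, h2, h3, List.count_eq_zero]

theorem pv_loop1 (grid : List String) : ∀ mn : Int,
    mxmnLoop1 mn grid = mn + (pvLead grid : Int) := by
  induction grid with
  | nil => intro mn; simp [mxmnLoop1, pvLead]
  | cons g rest ih =>
      intro mn
      by_cases hb : pvHasX g
      · have h : ¬ PySem.Str.count g "X" = 0 := fun hc => by
          simp [(pv_count_eq_zero_iff g).1 hc] at hb
        simp only [mxmnLoop1]
        rw [if_neg h]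
        simp [pvLead, hb]
      · have h : PySem.Str.count g "X" = 0 :=
          (pv_count_eq_zero_iff g).2 (by simpa using hb)
        simp only [mxmnLoop1]
        rw [if_pos h, ih]
        simp [pvLead, hb]
        ring

theorem pv_loop2 (grid : List String) : ∀ mx : Int,
    mxmnLoop2 mx grid = mx - (pvLead grid : Int) := by
  induction grid with
  | nil => intro mx; simp [mxmnLoop2, pvLead]
  | cons g rest ih =>
      intro mx
      by_cases hb : pvHasX g
      · have h : ¬ PySem.Str.count g "X" = 0 := fun hc => by
          simp [(pv_count_eq_zero_iff g).1 hc] at hb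
        simp only [mxmnLoop2]
        rw [if_neg h]
        simp [pvLead, hb]
      · have h : PySem.Str.count g "X" = 0 :=
          (pv_count_eq_zero_iff g).2 (by simpa using hb)
        simp only [mxmnLoop2]
        rw [if_pos h, ih]
        simp [pvLead, hb]
        ring

theorem pv_idx_cons (s : Int) (g : String) (rest : List String) :
    pvIdx s (g :: rest) = (if pvHasX g then [s] else []) ++ pvIdx (s + 1) rest := by
  unfold pvIdx
  rw [PySem.List.enumerate_cons]
  by_cases h : pvHasX g <;> simp [h]

theorem pv_idx_append_singleton (grid : List String) : ∀ (s : Int) (g : String),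
    pvIdx s (grid ++ [g]) =
      pvIdx s grid ++ (if pvHasX g then [s + (grid.length : Int)] else []) := by
  induction grid with
  | nil =>
      intro s g
      by_cases h : pvHasX g <;>
        simp [pvIdx, PySem.List.enumerate_cons, PySem.List.enumerate_nil, h]
  | cons a rest ih =>
      intro s g
      rw [List.cons_append, pv_idx_cons, ih, pv_idx_cons]
      rw [show s + 1 + (rest.length : Int) = s + ((a :: rest).length : Int) by
        push_cast [List.length_cons]; ring]
      rw [List.append_assoc]

theorem pv_idx_nil_iff (grid : List String) : ∀ s : Int,
    (pvIdx s grid = [] ↔ grid.all (fun g => !pvHasX g) = true) := by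
  induction grid with
  | nil => intro s; simp [pvIdx]
  | cons g rest ih =>
      intro s
      rw [pv_idx_cons]
      by_cases h : pvHasX g <;> simp [h, ih]

theorem pv_lead_all (grid : List String) (h : grid.all (fun g => !pvHasX g) = true) :
    pvLead grid = grid.length := by
  unfold pvLead
  rw [List.takeWhile_eq_self_iff.2]
  intro x hx
  simpa using List.all_eq_true.1 h x hx

theorem pv_idx_head (grid : List String) (h : ¬ grid.all (fun g => !pvHasX g) = true) :
    ∀ s : Int, (pvIdx s grid).headD 0 = s + (pvLead grid : Int) := by
  induction grid with
  | nil => simp at h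
  | cons g rest ih =>
      intro s
      rw [pv_idx_cons]
      by_cases hg : pvHasX g
      · simp [hg, pvLead]
      · have hrest : ¬ rest.all (fun g => !pvHasX g) = true := by
          intro hall; exact h (by simp [hall, hg])
        rw [if_neg (by simp [hg]), List.nil_append, ih hrest]
        simp [pvLead, hg]
        omega

theorem pv_idx_last (grid : List String) (h : ¬ grid.all (fun g => !pvHasX g) = true) :
    (pvIdx 0 grid).getLastD 0 = (grid.length : Int) - (pvLead grid.reverse : Int) - 1 := by
  induction grid using List.reverseRecOn with
  | nil => simp at h
  | append_singleton rest g ih =>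
      rw [pv_idx_append_singleton]
      by_cases hg : pvHasX g
      · simp [hg, List.reverse_append, pvLead]
      · have hrest : ¬ rest.all (fun x => !pvHasX x) = true := by
          intro hall
          exact h (by simp [List.all_append, hall, hg])
        rw [if_neg (by simp [hg]), List.append_nil, ih hrest]
        simp [List.reverse_append, pvLead, hg]

-- ===== VERDICT (by name: the statement is the Claim_ definition above) =====
theorem mxmn_spec : Claim_equal_mxmn := by
  intro grid _
  unfold Spec_mxmn mxmn mxmn_alt
  rw [PySem.List.slice?_none_none_neg_one]
  simp only [Option.getD_some]
  rw [pv_loop1, pv_loop2]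
  have hidx : (PySem.List.enumerate grid 0).filterMap
      (fun p => if PySem.Str.isIn "X" p.2 then some p.1 else none) = pvIdx 0 grid := rfl
  rw [hidx]
  by_cases h : grid.all (fun g => !pvHasX g) = true
  · have hnil : pvIdx 0 grid = [] := (pv_idx_nil_iff grid 0).2 h
    have hrev : grid.reverse.all (fun g => !pvHasX g) = true := by
      simpa [List.all_reverse] using h
    rw [hnil]
    simp [pv_lead_all grid h, pv_lead_all grid.reverse hrev]
  · have hnil : ¬ pvIdx 0 grid = [] := fun hn => h ((pv_idx_nil_iff grid 0).1 hn)
    rw [if_neg (by simpa [List.isEmpty_iff] using hnil)]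
    rw [pv_idx_head grid h 0, pv_idx_last grid h]
    rw [show (grid.length : Int) - (pvLead grid.reverse : Int) - 1 + 1 =
        (grid.length : Int) - (pvLead grid.reverse : Int) by ring]
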